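-- pv_equiv track=rewrite | github.com/ngoax/aoc25 | day5/day5.py | part2
-- ===== SOURCE A (Python) =====
-- def part2(ranges: list) -> int:
--     """ Merge overlapping ranges and count total IDs """
--     # Source: https://dev.to/grantdotdev/using-python-to-merge-array-of-ranges-2hic, Grant Riordan
--     sorted_ranges = sorted(ranges)
--
--     # Merge overlapping ranges
--     merged = []
--     for start, end in sorted_ranges:
--         if merged and start <= merged[-1][1] + 1:
--             # Overlapping or adjacent - merge with last range
--             merged[-1] = (merged[-1][0], max(merged[-1][1], end))
--         else:
--             # No overlap - add new range
--             merged.append((start, end))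
--
--     # Calculate total count from merged ranges
--     total_count = sum(end - start + 1 for start, end in merged)
--     return total_count
-- ===== SOURCE B (Python) =====
-- def part2(ranges: list) -> int:
--     """ Count total IDs via divide & conquer: recursively merge each half into a
--     canonical interval list (no library sort), then union the two lists. """
--     def union(ms, ns):
--         # merge two canonical interval lists by interleaving them in lexicographic
--         # order and fusing overlapping/adjacent intervals on the fly
--         out = []
--         i, j = 0, 0
--         while i < len(ms) or j < len(ns):
--             if j >= len(ns) or (i < len(ms) and ms[i] <= ns[j]):
--                 s, e = ms[i]; i += 1
--             else:
--                 s, e = ns[j]; j += 1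
--             if out and s <= out[-1][1] + 1:
--                 if e > out[-1][1]:
--                     out[-1] = (out[-1][0], e)
--             else:
--                 out.append((s, e))
--         return out
--
--     def merged(rs):
--         if len(rs) <= 1:
--             return [(s, e) for s, e in rs]
--         mid = len(rs) // 2
--         return union(merged(rs[:mid]), merged(rs[mid:]))
--
--     return sum(e - s + 1 for s, e in merged(ranges))
-- ===== Notes on version B (the rewrite author's own statement) =====
-- stated objective: alternative
-- what changed: B replaces A's library-sort-then-linear-merge-sweep with a divide-and-conquer scheme: it does no sorting pass at all, but recursively splits the raw list in half, merges each half into its canonical interval list, and combines the two halves with a two-pointer union walk (a mergesort fused with interval union), summing the resulting interval lengths.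
import Mathlib
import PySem

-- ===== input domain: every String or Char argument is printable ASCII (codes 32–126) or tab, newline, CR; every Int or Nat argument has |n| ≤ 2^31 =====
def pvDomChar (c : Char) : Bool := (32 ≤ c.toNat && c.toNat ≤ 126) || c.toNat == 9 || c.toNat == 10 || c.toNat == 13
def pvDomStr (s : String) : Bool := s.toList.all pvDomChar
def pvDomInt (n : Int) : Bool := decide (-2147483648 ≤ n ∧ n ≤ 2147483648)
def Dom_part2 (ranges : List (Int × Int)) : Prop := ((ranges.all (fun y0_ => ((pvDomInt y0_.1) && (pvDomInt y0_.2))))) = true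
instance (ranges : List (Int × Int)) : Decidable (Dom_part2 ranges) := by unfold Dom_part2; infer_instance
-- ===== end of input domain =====

-- B replaces A's sort-then-sweep by a divide-and-conquer merge (halve, recurse, two-pointer union of
-- canonical interval lists, no library sort); objective: alternative algorithm, same result.

-- ===== PORT A =====
def part2 (ranges : List (Int × Int)) : Int :=
  let sortedRanges := PySem.List.sorted2 ranges Prod.fst Prod.snd false
  let merged := sortedRanges.foldl (fun merged p =>
    match merged.getLast? with
    | some last =>
        if p.1 ≤ last.2 + 1 then
          merged.dropLast ++ [(last.1, max last.2 p.2)]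
        else
          merged ++ [p]
    | none => merged ++ [p]) ([] : List (Int × Int))
  (merged.map (fun p => p.2 - p.1 + 1)).sum

-- ===== PORT B =====
-- Source B's lexicographic tuple comparison ms[i] <= ns[j]
def pvLeB (p q : Int × Int) : Bool := decide (p.1 < q.1) || (decide (p.1 = q.1) && decide (p.2 ≤ q.2))

-- Source B's in-loop fuse of the picked interval (s,e) onto out's last element
def pvPush (out : List (Int × Int)) (p : Int × Int) : List (Int × Int) :=
  match out.getLast? with
  | some last =>
      if p.1 ≤ last.2 + 1 then
        if last.2 < p.2 then out.dropLast ++ [(last.1, p.2)] else out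
      else out ++ [p]
  | none => out ++ [p]

-- Source B's union(ms, ns): two-pointer walk over the two canonical lists
def pvUnionGo (ms ns out : List (Int × Int)) : List (Int × Int) :=
  match ms, ns with
  | [], [] => out
  | m :: ms', [] => pvUnionGo ms' [] (pvPush out m)
  | [], n :: ns' => pvUnionGo [] ns' (pvPush out n)
  | m :: ms', n :: ns' =>
      if pvLeB m n then pvUnionGo ms' (n :: ns') (pvPush out m)
      else pvUnionGo (m :: ms') ns' (pvPush out n)
termination_by ms.length + ns.length

-- Source B's merged(rs): halve, recurse, union; mid = len(rs)//2 is Nat division on a nonnegative length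
-- and rs[:mid]/rs[mid:] with 0 ≤ mid ≤ len are take/drop — all exact here
def pvMergedRec (rs : List (Int × Int)) : List (Int × Int) :=
  if rs.length ≤ 1 then rs
  else
    let mid := rs.length / 2
    pvUnionGo (pvMergedRec (rs.take mid)) (pvMergedRec (rs.drop mid)) []
termination_by rs.length
decreasing_by
  · simp [List.length_take]; omega
  · simp [List.length_drop]; omega

def part2_alt (ranges : List (Int × Int)) : Int :=
  ((pvMergedRec ranges).map (fun p => p.2 - p.1 + 1)).sum

-- ===== PRECONDITION & SPEC =====
def Spec_part2 (ranges : List (Int × Int)) (out : Int) : Prop := out = part2_alt ranges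
instance (ranges : List (Int × Int)) (out : Int) : Decidable (Spec_part2 ranges out) := by unfold Spec_part2; infer_instance

-- ===== CLAIM (what is proved, stated in full; the proofs are below) =====
def Claim_equal_part2 : Prop := ∀ (ranges : List (Int × Int)), Dom_part2 ranges → Spec_part2 ranges (part2 ranges)

-- ===== LEMMAS AND PROOFS =====

-- A's loop step (the inline lambda of part2, named for the proofs)
def pvStep (m : List (Int × Int)) (p : Int × Int) : List (Int × Int) :=
  match m.getLast? with
  | some last =>
      if p.1 ≤ last.2 + 1 then
        m.dropLast ++ [(last.1, max last.2 p.2)]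
      else
        m ++ [p]
  | none => m ++ [p]

-- lexicographic (Python tuple) order on pairs
def sLe (p q : Int × Int) : Prop := p.1 < q.1 ∨ (p.1 = q.1 ∧ p.2 ≤ q.2)

def sortLex (l : List (Int × Int)) : List (Int × Int) :=
  PySem.List.sorted2 l Prod.fst Prod.snd false

def mergedOf (l : List (Int × Int)) : List (Int × Int) :=
  (sortLex l).foldl pvStep []

-- the strict 'before' comparison sorted2 inserts with
def pvBfr (a b : Int × Int) : Bool :=
  decide (a.1 < b.1) || (!decide (b.1 < a.1) && decide (a.2 < b.2))

def pvIns (x : Int × Int) (l : List (Int × Int)) : List (Int × Int) :=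
  PySem.List.insertBy pvBfr x l

theorem sortLex_eq_foldl (l : List (Int × Int)) :
    sortLex l = l.foldl (fun acc x => pvIns x acc) [] := rfl

theorem pvBfr_true {a b : Int × Int} (h : pvBfr a b = true) :
    a.1 < b.1 ∨ (a.1 = b.1 ∧ a.2 < b.2) := by
  simp [pvBfr] at h; omega

theorem pvBfr_false {a b : Int × Int} (h : pvBfr a b = false) : sLe b a := by
  simp [pvBfr] at h; unfold sLe; omega

theorem sLe_of_bfr {a b : Int × Int} (h : pvBfr a b = true) : sLe a b := by
  rcases pvBfr_true h with h1 | h2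
  · exact Or.inl h1
  · exact Or.inr ⟨h2.1, le_of_lt h2.2⟩

theorem sLe_trans {a b c : Int × Int} (h1 : sLe a b) (h2 : sLe b c) : sLe a c := by
  unfold sLe at *; omega

theorem sLe_antisymm {a b : Int × Int} (h1 : sLe a b) (h2 : sLe b a) : a = b := by
  unfold sLe at *
  have : a.1 = b.1 ∧ a.2 = b.2 := by omega
  exact Prod.ext this.1 this.2

theorem pvIns_perm (x : Int × Int) (l : List (Int × Int)) : (pvIns x l).Perm (x :: l) :=
  PySem.List.insertBy_perm pvBfr x l

theorem pvIns_mem {y x : Int × Int} {l : List (Int × Int)} (h : y ∈ pvIns x l) :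
    y = x ∨ y ∈ l := by
  induction l with
  | nil => simp [pvIns, PySem.List.insertBy] at h; simp [h]
  | cons z zs ih =>
    by_cases hb : pvBfr x z
    · simp [pvIns, PySem.List.insertBy, hb] at h
      rcases h with h | h | h <;> simp [h]
    · simp only [pvIns, PySem.List.insertBy, hb, Bool.false_eq_true, if_false,
        List.mem_cons] at h
      rcases h with h | h
      · simp [h]
      · rcases ih h with h' | h' <;> simp [h']

theorem pvIns_pairwise (x : Int × Int) (l : List (Int × Int)) (h : l.Pairwise sLe) :
    (pvIns x l).Pairwise sLe := by
  induction l with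
  | nil => simp [pvIns, PySem.List.insertBy]
  | cons z zs ih =>
    rcases List.pairwise_cons.mp h with ⟨hz, hzs⟩
    by_cases hb : pvBfr x z
    · simp only [pvIns, PySem.List.insertBy, hb, if_true]
      refine List.Pairwise.cons ?_ h
      intro y hy
      rcases List.mem_cons.mp hy with rfl | hy'
      · exact sLe_of_bfr hb
      · exact sLe_trans (sLe_of_bfr hb) (hz y hy')
    · simp only [pvIns, PySem.List.insertBy, hb, Bool.false_eq_true, if_false]
      refine List.Pairwise.cons ?_ (ih hzs)
      intro y hy
      rcases pvIns_mem hy with rfl | hy'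
      · exact pvBfr_false (Bool.not_eq_true _ ▸ eq_false_of_ne_true hb)
      · exact hz y hy'

theorem foldl_ins_pairwise (l : List (Int × Int)) : ∀ acc : List (Int × Int),
    acc.Pairwise sLe → (l.foldl (fun acc x => pvIns x acc) acc).Pairwise sLe := by
  induction l with
  | nil => intro acc h; exact h
  | cons x xs ih => intro acc h; exact ih _ (pvIns_pairwise x acc h)

theorem sortLex_pairwise (l : List (Int × Int)) : (sortLex l).Pairwise sLe := by
  rw [sortLex_eq_foldl]
  exact foldl_ins_pairwise l [] List.Pairwise.nil

theorem sortLex_perm (l : List (Int × Int)) : (sortLex l).Perm l :=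
  PySem.List.sorted2_perm l Prod.fst Prod.snd false

theorem sortLex_char {l ys : List (Int × Int)} (h : ys.Perm l) (hp : ys.Pairwise sLe) :
    sortLex l = ys := by
  exact List.Perm.eq_of_pairwise
    (fun a b _ _ h1 h2 => sLe_antisymm h1 h2) (sortLex_pairwise l) hp
    ((sortLex_perm l).trans h.symm)

theorem sortLex_congr {l1 l2 : List (Int × Int)} (h : l1.Perm l2) : sortLex l1 = sortLex l2 :=
  sortLex_char ((sortLex_perm l2).trans h.symm) (sortLex_pairwise l2)

theorem mergedOf_congr {l1 l2 : List (Int × Int)} (h : l1.Perm l2) : mergedOf l1 = mergedOf l2 := by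
  unfold mergedOf; rw [sortLex_congr h]

-- basic shape lemmas about pvStep
theorem eq_dropLast_concat {S : List (Int × Int)} {c : Int × Int} (h : S.getLast? = some c) :
    S = S.dropLast ++ [c] := by
  rcases List.getLast?_eq_some_iff.mp h with ⟨S', rfl⟩
  simp

theorem pvStep_ne_nil (S : List (Int × Int)) (p : Int × Int) : pvStep S p ≠ [] := by
  unfold pvStep
  cases h : S.getLast? <;> simp <;> split <;> simp

theorem pvStep_shape (S : List (Int × Int)) (x : Int × Int) :
    ∃ S' g, pvStep S x = S' ++ [g] ∧ x.2 ≤ g.2 ∧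
      ∀ b : Int × Int, pvStep S (x.1, max x.2 b.2) = S' ++ [(g.1, max g.2 b.2)] := by
  cases hL : S.getLast? with
  | none =>
    refine ⟨S, x, by simp [pvStep, hL], le_refl _, fun b => by simp [pvStep, hL]⟩
  | some c =>
    by_cases hc : x.1 ≤ c.2 + 1
    · refine ⟨S.dropLast, (c.1, max c.2 x.2), by simp [pvStep, hL, hc], by simp, fun b => ?_⟩
      have : max (max c.2 x.2) b.2 = max c.2 (max x.2 b.2) := by omega
      simp [pvStep, hL, hc, this]
    · refine ⟨S, x, by simp [pvStep, hL, hc], le_refl _, fun b => by simp [pvStep, hL, hc]⟩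

theorem pvStep2 (S : List (Int × Int)) (a b : Int × Int) (h : b.1 ≤ a.2 + 1) :
    pvStep (pvStep S a) b = pvStep S (a.1, max a.2 b.2) := by
  obtain ⟨S', g, h1, h2, h3⟩ := pvStep_shape S a
  rw [h1, h3 b]
  have hb : b.1 ≤ g.2 + 1 := by omega
  simp [pvStep, hb]

theorem pvStep_ctx (G S : List (Int × Int)) (p : Int × Int) (h : S ≠ []) :
    pvStep (G ++ S) p = G ++ pvStep S p := by
  rcases List.eq_nil_or_concat S with rfl | ⟨S', c, rfl⟩
  · exact absurd rfl h
  · simp only [List.concat_eq_append]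
    unfold pvStep
    rw [show (G ++ (S' ++ [c])).getLast? = some c by simp,
        show (S' ++ [c]).getLast? = some c by simp]
    split <;> first
      | (rename_i heq; cases heq; split <;> simp)
      | simp_all

theorem chain_ctx (l : List (Int × Int)) : ∀ (G S : List (Int × Int)), S ≠ [] →
    List.foldl pvStep (G ++ S) l = G ++ List.foldl pvStep S l := by
  induction l with
  | nil => intro G S _; rfl
  | cons p l ih =>
    intro G S h
    simp only [List.foldl_cons]
    rw [pvStep_ctx G S p h, ih G _ (pvStep_ne_nil S p)]

-- inserting b below the open group g merges b into it
theorem pvStep_concat_merge (S : List (Int × Int)) (g b : Int × Int) (hb : b.1 ≤ g.2 + 1) :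
    pvStep (S ++ [g]) b = S ++ [(g.1, max g.2 b.2)] := by
  unfold pvStep
  rw [show (S ++ [g]).getLast? = some g by simp]
  simp [hb]

theorem absorb1 (t : List (Int × Int)) : ∀ (S : List (Int × Int)) (g b : Int × Int),
    b.1 ≤ g.2 + 1 →
    List.foldl pvStep (S ++ [g]) (pvIns b t) = List.foldl pvStep (S ++ [(g.1, max g.2 b.2)]) t := by
  induction t with
  | nil =>
    intro S g b hb
    show List.foldl pvStep (S ++ [g]) [b] = _
    simp only [List.foldl_cons, List.foldl_nil]
    exact pvStep_concat_merge S g b hb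
  | cons x t ih =>
    intro S g b hb
    by_cases hbx : pvBfr b x
    · show List.foldl pvStep (S ++ [g]) (PySem.List.insertBy pvBfr b (x :: t)) = _
      simp only [PySem.List.insertBy, hbx, if_true, List.foldl_cons]
      rw [pvStep_concat_merge S g b hb]
    · show List.foldl pvStep (S ++ [g]) (PySem.List.insertBy pvBfr b (x :: t)) = _
      simp only [PySem.List.insertBy, hbx, Bool.false_eq_true, if_false, List.foldl_cons]
      have hx : sLe x b := pvBfr_false (Bool.not_eq_true _ ▸ eq_false_of_ne_true hbx)
      have hx1 : x.1 ≤ g.2 + 1 := by unfold sLe at hx; omega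
      rw [pvStep_concat_merge S g x hx1]
      have ih' := ih S (g.1, max g.2 x.2) b (by simp; omega)
      unfold pvIns at ih'
      rw [ih', pvStep_concat_merge S (g.1, max g.2 b.2) x (by simp; omega)]
      have : max (max g.2 x.2) b.2 = max (max g.2 b.2) x.2 := by omega
      simp [this]

theorem absorb_step (t : List (Int × Int)) (S : List (Int × Int)) (x b : Int × Int)
    (hb : b.1 ≤ x.2 + 1) :
    List.foldl pvStep (pvStep S x) (pvIns b t) = List.foldl pvStep (pvStep S (x.1, max x.2 b.2)) t := by
  obtain ⟨S', g, h1, h2, h3⟩ := pvStep_shape S x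
  rw [h1, h3 b, absorb1 t S' g b (by omega)]

-- fusing two mergeable inserted ranges never changes the sweep's result
theorem pvBfr_false' {a b : Int × Int} (h : ¬ pvBfr a b = true) : sLe b a :=
  pvBfr_false (by simpa using h)

theorem pvSwap (v : List (Int × Int)) : ∀ (S : List (Int × Int)) (a b : Int × Int),
    sLe a b → b.1 ≤ a.2 + 1 →
    List.foldl pvStep S (pvIns a (pvIns b v)) = List.foldl pvStep S (pvIns (a.1, max a.2 b.2) v) := by
  induction v with
  | nil =>
    intro S a b hab hba
    by_cases hab' : pvBfr a b
    · simp only [pvIns, PySem.List.insertBy, hab', if_true, List.foldl_cons, List.foldl_nil]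
      exact pvStep2 S a b hba
    · have he : a = b := sLe_antisymm hab (pvBfr_false' hab')
      subst he
      simp only [pvIns, PySem.List.insertBy, hab', Bool.false_eq_true, if_false,
        List.foldl_cons, List.foldl_nil]
      exact pvStep2 S a a hba
  | cons h t ih =>
    intro S a b hab hba
    by_cases hbh : pvBfr b h
    · have e1 : pvIns b (h :: t) = b :: h :: t := by
        simp [pvIns, PySem.List.insertBy, hbh]
      by_cases hab' : pvBfr a b
      · have e2 : pvIns a (b :: h :: t) = a :: b :: h :: t := by
          simp [pvIns, PySem.List.insertBy, hab']
        have hfh : pvBfr (a.1, max a.2 b.2) h = true := by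
          have h1 := pvBfr_true hbh
          unfold sLe at hab
          simp only [pvBfr, Bool.or_eq_true, Bool.and_eq_true, Bool.not_eq_eq_eq_not,
            Bool.not_true, decide_eq_true_eq, decide_eq_false_iff_not]
          omega
        have e3 : pvIns (a.1, max a.2 b.2) (h :: t) = (a.1, max a.2 b.2) :: h :: t := by
          simp [pvIns, PySem.List.insertBy, hfh]
        rw [e1, e2, e3]
        simp only [List.foldl_cons]
        rw [pvStep2 S a b hba]
      · have he : a = b := sLe_antisymm hab (pvBfr_false' hab')
        subst he
        have hself : pvBfr a a = false := by simp [pvBfr]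
        have e2 : pvIns a (a :: h :: t) = a :: a :: h :: t := by
          simp [pvIns, PySem.List.insertBy, hself, hbh]
        rw [e1, e2]
        simp only [List.foldl_cons]
        rw [pvStep2 S a a hba]
        have hfuse : ((a.1, max a.2 a.2) : Int × Int) = a := by simp
        rw [hfuse, e1]
        simp only [List.foldl_cons]
    · have e1 : pvIns b (h :: t) = h :: pvIns b t := by
        simp [pvIns, PySem.List.insertBy, hbh]
      have hhb : sLe h b := pvBfr_false' hbh
      by_cases hah : pvBfr a h
      · have e2 : pvIns a (h :: pvIns b t) = a :: h :: pvIns b t := by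
          simp [pvIns, PySem.List.insertBy, hah]
        have hha : h.1 ≤ a.2 + 1 := by unfold sLe at hhb; omega
        rw [e1, e2]
        simp only [List.foldl_cons]
        rw [pvStep2 S a h hha]
        rw [absorb_step t S (a.1, max a.2 h.2) b (by simp; omega)]
        by_cases hfh : pvBfr (a.1, max a.2 b.2) h
        · have e3 : pvIns (a.1, max a.2 b.2) (h :: t) = (a.1, max a.2 b.2) :: h :: t := by
            simp [pvIns, PySem.List.insertBy, hfh]
          rw [e3]
          simp only [List.foldl_cons]
          rw [pvStep2 S (a.1, max a.2 b.2) h (by simp; unfold sLe at hhb; omega)]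
          rw [show ((a.1 : Int), max (max a.2 h.2) b.2) = (a.1, max (max a.2 b.2) h.2) from by
            rw [Prod.mk.injEq]; constructor; rfl; omega]
        · have hha2 : sLe h (a.1, max a.2 b.2) := pvBfr_false' hfh
          have hha2' : h.1 < a.1 ∨ (h.1 = a.1 ∧ h.2 ≤ max a.2 b.2) := by
            unfold sLe at hha2; exact hha2
          have hstrict := pvBfr_true hah
          have heq1 : a.1 = h.1 := by omega
          have hgoal : a.1 ≤ h.2 + 1 := by unfold sLe at hhb hab; omega
          have e3 : pvIns (a.1, max a.2 b.2) (h :: t) = h :: pvIns (a.1, max a.2 b.2) t := by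
            simp [pvIns, PySem.List.insertBy, hfh]
          rw [e3]
          simp only [List.foldl_cons]
          rw [absorb_step t S h (a.1, max a.2 b.2) hgoal]
          rw [show ((h.1 : Int), max h.2 (max a.2 b.2)) = (a.1, max (max a.2 h.2) b.2) from by
            rw [Prod.mk.injEq]
            exact ⟨heq1.symm, by omega⟩]
      · have e2 : pvIns a (h :: pvIns b t) = h :: pvIns a (pvIns b t) := by
          simp [pvIns, PySem.List.insertBy, hah]
        have hha3 : sLe h a := pvBfr_false' hah
        have hfh : pvBfr (a.1, max a.2 b.2) h = false := by
          unfold sLe at hha3 hab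
          simp [pvBfr]
          omega
        have e3 : pvIns (a.1, max a.2 b.2) (h :: t) = h :: pvIns (a.1, max a.2 b.2) t := by
          simp [pvIns, PySem.List.insertBy, hfh]
        rw [e1, e2, e3]
        simp only [List.foldl_cons]
        exact ih (pvStep S h) a b hab hba

theorem chain_pairwise (l : List (Int × Int)) : ∀ S : List (Int × Int),
    l.Pairwise sLe → S.Pairwise sLe → (∀ c ∈ S, ∀ p ∈ l, sLe c p) →
    (List.foldl pvStep S l).Pairwise sLe := by
  induction l with
  | nil => intro S _ hS _; exact hS
  | cons p l ih =>
    intro S hl hS hinv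
    rcases List.pairwise_cons.mp hl with ⟨hph, hlt⟩
    simp only [List.foldl_cons]
    have hmem : ∀ c ∈ pvStep S p, ∀ q ∈ l, sLe c q := by
      intro c hc q hq
      cases hL : S.getLast? with
      | none =>
        have hSnil : S = [] := List.getLast?_eq_none_iff.mp hL
        subst hSnil
        simp [pvStep] at hc
        subst hc
        exact hph q hq
      | some c0 =>
        have hS0 : S = S.dropLast ++ [c0] := eq_dropLast_concat hL
        unfold pvStep at hc
        rw [hL] at hc
        by_cases hcond : p.1 ≤ c0.2 + 1
        · simp only [hcond, if_true, List.mem_append, List.mem_singleton] at hc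
          rcases hc with hc | rfl
          · exact hinv c (by rw [hS0]; exact List.mem_append_left _ hc) q (List.mem_cons_of_mem _ hq)
          · have h1 : sLe c0 q :=
              hinv c0 (by rw [hS0]; simp) q (List.mem_cons_of_mem _ hq)
            have h2 : sLe p q := hph q hq
            have h3 : sLe c0 p :=
              hinv c0 (by rw [hS0]; simp) p (List.mem_cons_self)
            unfold sLe at h1 h2 h3 ⊢
            simp only []
            omega
        · simp only [hcond, if_false, List.mem_append, List.mem_singleton] at hc
          rcases hc with hc | rfl
          · exact hinv c hc q (List.mem_cons_of_mem _ hq)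
          · exact hph q hq
    have hpw : (pvStep S p).Pairwise sLe := by
      cases hL : S.getLast? with
      | none =>
        have hSnil : S = [] := List.getLast?_eq_none_iff.mp hL
        subst hSnil
        simp [pvStep]
      | some c0 =>
        have hS0 : S = S.dropLast ++ [c0] := eq_dropLast_concat hL
        unfold pvStep
        rw [hL]
        by_cases hcond : p.1 ≤ c0.2 + 1
        · simp only [hcond, if_true]
          rw [List.pairwise_append]
          refine ⟨List.Pairwise.sublist (List.dropLast_sublist S) hS,
            List.pairwise_singleton _ _, ?_⟩
          intro d hd e he
          rw [List.mem_singleton] at he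
          subst he
          have hdc : sLe d c0 := by
            have := (List.pairwise_append.mp (hS0 ▸ hS)).2.2
            exact this d hd c0 (List.mem_singleton_self _)
          unfold sLe at hdc ⊢
          simp only []
          omega
        · simp only [hcond, if_false]
          rw [List.pairwise_append]
          exact ⟨hS, List.pairwise_singleton _ _,
            fun d hd e he => by
              rw [List.mem_singleton] at he
              subst he
              exact hinv d hd _ List.mem_cons_self⟩
    exact ih (pvStep S p) hlt hpw hmem

theorem mergedOf_pairwise (l : List (Int × Int)) : (mergedOf l).Pairwise sLe := by
  refine chain_pairwise _ [] (sortLex_pairwise l) List.Pairwise.nil ?_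
  intro c hc; simp at hc

-- replacing a list by its merged canonical form does not change any larger merge
theorem pvAbsorb : ∀ (n : Nat) (l u : List (Int × Int)), l.length = n →
    mergedOf (mergedOf l ++ u) = mergedOf (l ++ u) := by
  intro n
  induction n using Nat.strong_induction_on with
  | _ n IH =>
  intro l u hn
  have hperm0 : (sortLex l).Perm l := sortLex_perm l
  rcases hsl : sortLex l with _ | ⟨a, _ | ⟨b, t⟩⟩
  · -- sortLex l = []
    rw [hsl] at hperm0
    have : l = [] := hperm0.nil_eq.symm
    subst this
    have hme : mergedOf ([] : List (Int × Int)) = [] := by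
      unfold mergedOf
      rw [hsl]
      rfl
    rw [hme]
  · -- sortLex l = [a]
    rw [hsl] at hperm0
    have hme : mergedOf l = [a] := by
      unfold mergedOf
      rw [hsl]
      rfl
    rw [hme]
    exact mergedOf_congr (hperm0.append_right u)
  · -- sortLex l = a :: b :: t
    rw [hsl] at hperm0
    have hpw : (a :: b :: t).Pairwise sLe := hsl ▸ sortLex_pairwise l
    have hab : sLe a b := (List.pairwise_cons.mp hpw).1 b List.mem_cons_self
    have hlen : l.length = t.length + 2 := by
      have := hperm0.length_eq
      simp at this
      omega
    by_cases hm : b.1 ≤ a.2 + 1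
    · -- mergeable head pair: fuse it
      have hft : ∀ x ∈ t, sLe (a.1, max a.2 b.2) x := by
        intro x hx
        have h1 : sLe b x := (List.pairwise_cons.mp (List.pairwise_cons.mp hpw).2).1 x hx
        unfold sLe at hab h1 ⊢
        simp only []
        omega
      have hpwf : ((a.1, max a.2 b.2) :: t).Pairwise sLe :=
        List.pairwise_cons.mpr ⟨hft, (List.pairwise_cons.mp (List.pairwise_cons.mp hpw).2).2⟩
      have e1 : mergedOf l = mergedOf ((a.1, max a.2 b.2) :: t) := by
        unfold mergedOf
        rw [hsl, sortLex_char (List.Perm.refl _) hpwf]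
        simp only [List.foldl_cons]
        rw [pvStep2 [] a b hm]
      have e2 : mergedOf (((a.1, max a.2 b.2) :: t) ++ u) = mergedOf (l ++ u) := by
        have s1 : sortLex (((a.1, max a.2 b.2) :: t) ++ u) =
            pvIns (a.1, max a.2 b.2) (sortLex (t ++ u)) := by
          refine sortLex_char ?_ (pvIns_pairwise _ _ (sortLex_pairwise _))
          exact (pvIns_perm _ _).trans ((sortLex_perm (t ++ u)).cons _)
        have s2 : sortLex (l ++ u) = pvIns a (pvIns b (sortLex (t ++ u))) := by
          refine sortLex_char ?_ (pvIns_pairwise _ _ (pvIns_pairwise _ _ (sortLex_pairwise _)))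
          have p1 : (pvIns b (sortLex (t ++ u))).Perm (b :: (t ++ u)) :=
            (pvIns_perm _ _).trans ((sortLex_perm (t ++ u)).cons b)
          have p2 : (pvIns a (pvIns b (sortLex (t ++ u)))).Perm (a :: b :: (t ++ u)) :=
            (pvIns_perm _ _).trans (p1.cons a)
          refine p2.trans ?_
          simpa using hperm0.append_right u
        unfold mergedOf
        rw [s1, s2]
        exact (pvSwap (sortLex (t ++ u)) [] a b hab hm).symm
      have e3 := IH (t.length + 1) (by omega) ((a.1, max a.2 b.2) :: t) u (by simp)
      rw [e1, e3, e2]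
    · -- head a is its own group
      have hpwbt : (b :: t).Pairwise sLe := (List.pairwise_cons.mp hpw).2
      have e1 : mergedOf l = a :: mergedOf (b :: t) := by
        unfold mergedOf
        rw [hsl, sortLex_char (List.Perm.refl _) hpwbt]
        simp only [List.foldl_cons]
        have h1 : pvStep (pvStep [] a) b = [a] ++ [b] := by
          simp [pvStep, hm]
        have h2 : pvStep ([] : List (Int × Int)) b = [b] := by simp [pvStep]
        rw [h1, h2, chain_ctx t [a] [b] (by simp)]
        rfl
      calc mergedOf (mergedOf l ++ u)
          = mergedOf ((a :: mergedOf (b :: t)) ++ u) := by rw [e1]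
        _ = mergedOf (mergedOf (b :: t) ++ (a :: u)) :=
            mergedOf_congr (by simpa using List.perm_middle.symm)
        _ = mergedOf ((b :: t) ++ (a :: u)) := IH (t.length + 1) (by omega) (b :: t) (a :: u) (by simp)
        _ = mergedOf (l ++ u) := by
            refine mergedOf_congr ?_
            have h0 : (b :: t) ++ (a :: u) = b :: (t ++ a :: u) := by simp
            rw [h0]
            refine List.Perm.trans ((List.perm_middle).cons b) ?_
            refine List.Perm.trans (List.Perm.swap a b _) ?_
            simpa using hperm0.append_right u

-- Source B's union against the canonical semantics
theorem pvPush_eq (out : List (Int × Int)) (p : Int × Int) : pvPush out p = pvStep out p := by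
  unfold pvPush pvStep
  cases hL : out.getLast? with
  | none => rfl
  | some last =>
    by_cases h1 : p.1 ≤ last.2 + 1
    · simp only [h1, if_true]
      by_cases h2 : last.2 < p.2
      · simp [h2, max_eq_right (le_of_lt h2)]
      · simp only [h2, if_false]
        rw [max_eq_left (by omega)]
        conv_lhs => rw [eq_dropLast_concat hL]
    · simp [h1]

def pvLexMerge : List (Int × Int) → List (Int × Int) → List (Int × Int)
  | [], ns => ns
  | ms, [] => ms
  | m :: ms', n :: ns' =>
      if pvLeB m n then m :: pvLexMerge ms' (n :: ns') else n :: pvLexMerge (m :: ms') ns'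
termination_by ms ns => ms.length + ns.length

theorem pvLexMerge_nil_left (ns : List (Int × Int)) : pvLexMerge [] ns = ns := by
  cases ns <;> rw [pvLexMerge.eq_def]

theorem pvLexMerge_nil_right (ms : List (Int × Int)) : pvLexMerge ms [] = ms := by
  cases ms <;> rw [pvLexMerge.eq_def]

theorem pvLexMerge_cons_cons (m n : Int × Int) (ms' ns' : List (Int × Int)) :
    pvLexMerge (m :: ms') (n :: ns') =
      if pvLeB m n then m :: pvLexMerge ms' (n :: ns') else n :: pvLexMerge (m :: ms') ns' := by
  rw [pvLexMerge.eq_def]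

theorem unionGo_eq (ms ns out : List (Int × Int)) :
    pvUnionGo ms ns out = List.foldl pvStep out (pvLexMerge ms ns) := by
  fun_induction pvUnionGo ms ns out <;>
    simp_all [pvLexMerge_nil_left, pvLexMerge_nil_right, pvLexMerge_cons_cons, pvPush_eq]

theorem pvLexMerge_perm (ms ns : List (Int × Int)) : (pvLexMerge ms ns).Perm (ms ++ ns) := by
  fun_induction pvLexMerge ms ns with
  | case1 ns => simp
  | case2 ms h => simp
  | case3 m ms' n ns' hc ih => simpa [pvLexMerge_cons_cons, hc] using ih.cons m
  | case4 m ms' n ns' hc ih =>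
    exact (ih.cons n).trans List.perm_middle.symm

theorem pvLeB_true {p q : Int × Int} (h : pvLeB p q = true) : sLe p q := by
  simp [pvLeB] at h; unfold sLe; omega

theorem pvLeB_false {p q : Int × Int} (h : pvLeB p q = false) : sLe q p := by
  simp [pvLeB] at h; unfold sLe; omega

theorem pvLexMerge_pairwise (ms ns : List (Int × Int))
    (hm : ms.Pairwise sLe) (hn : ns.Pairwise sLe) : (pvLexMerge ms ns).Pairwise sLe := by
  fun_induction pvLexMerge ms ns with
  | case1 ns => exact hn
  | case2 ms h => exact hm
  | case3 m ms' n ns' hc ih =>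
    rcases List.pairwise_cons.mp hm with ⟨hmh, hmt⟩
    rcases List.pairwise_cons.mp hn with ⟨hnh, _⟩
    refine List.Pairwise.cons ?_ (ih hmt hn)
    intro y hy
    have hy' : y ∈ ms' ++ n :: ns' := (pvLexMerge_perm ms' (n :: ns')).mem_iff.mp hy
    rcases List.mem_append.mp hy' with h1 | h1
    · exact hmh y h1
    · rcases List.mem_cons.mp h1 with rfl | h2
      · exact pvLeB_true hc
      · exact sLe_trans (pvLeB_true hc) (hnh y h2)
  | case4 m ms' n ns' hc ih =>
    rcases List.pairwise_cons.mp hm with ⟨hmh, _⟩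
    rcases List.pairwise_cons.mp hn with ⟨hnh, hnt⟩
    refine List.Pairwise.cons ?_ (ih hm hnt)
    have hnm : sLe n m := pvLeB_false (Bool.not_eq_true _ ▸ eq_false_of_ne_true hc)
    intro y hy
    have hy' : y ∈ (m :: ms') ++ ns' := (pvLexMerge_perm (m :: ms') ns').mem_iff.mp hy
    rcases List.mem_append.mp hy' with h1 | h1
    · rcases List.mem_cons.mp h1 with rfl | h2
      · exact hnm
      · exact sLe_trans hnm (hmh y h2)
    · exact hnh y h1

theorem union_merged (xs ys : List (Int × Int)) :
    pvUnionGo (mergedOf xs) (mergedOf ys) [] = mergedOf (xs ++ ys) := by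
  rw [unionGo_eq]
  have hlm : pvLexMerge (mergedOf xs) (mergedOf ys) = sortLex (mergedOf xs ++ mergedOf ys) :=
    (sortLex_char (pvLexMerge_perm _ _)
      (pvLexMerge_pairwise _ _ (mergedOf_pairwise xs) (mergedOf_pairwise ys))).symm
  rw [hlm]
  have h1 : (sortLex (mergedOf xs ++ mergedOf ys)).foldl pvStep [] =
      mergedOf (mergedOf xs ++ mergedOf ys) := rfl
  rw [h1, pvAbsorb xs.length xs (mergedOf ys) rfl]
  have h2 : mergedOf (xs ++ mergedOf ys) = mergedOf (mergedOf ys ++ xs) :=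
    mergedOf_congr List.perm_append_comm
  rw [h2, pvAbsorb ys.length ys xs rfl]
  exact mergedOf_congr List.perm_append_comm

theorem pvMergedRec_eq : ∀ (n : Nat) (rs : List (Int × Int)), rs.length = n →
    pvMergedRec rs = mergedOf rs := by
  intro n
  induction n using Nat.strong_induction_on with
  | _ n IH =>
  intro rs hn
  rw [pvMergedRec]
  by_cases h1 : rs.length ≤ 1
  · simp only [h1, if_true]
    rcases rs with _ | ⟨p, _ | ⟨q, rest⟩⟩
    · rfl
    · rfl
    · simp at h1
  · simp only [h1, if_false]
    rw [IH (rs.take (rs.length / 2)).length (by simp; omega) _ rfl,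
        IH (rs.drop (rs.length / 2)).length (by simp; omega) _ rfl,
        union_merged, List.take_append_drop]


-- ===== VERDICT (by name: the statement is the Claim_ definition above) =====
theorem part2_spec : Claim_equal_part2 := by
  intro ranges _
  unfold Spec_part2 part2 part2_alt
  rw [pvMergedRec_eq ranges.length ranges rfl]
  rfl
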